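-- pv_equiv track=rewrite | github.com/sayantanr/all-script-transliterator | ishowsppedv2errorbypass.py | chunk_text_by_bytes
-- ===== SOURCE A (Python) =====
-- from typing import List
--
-- def chunk_text_by_bytes(s: str, max_bytes: int) -> List[str]:
--     b = s.encode("utf-8")
--     L = len(b)
--     if L <= max_bytes:
--         return [s]
--     out = []
--     start = 0
--     while start < L:
--         end = min(start + max_bytes, L)
--         # don't cut multibyte char
--         while end > start and (b[end - 1] & 0xC0) == 0x80:
--             end -= 1
--         out.append(b[start:end].decode("utf-8", errors="ignore"))
--         start = end
--     return out
-- ===== SOURCE B (Python) =====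
-- def chunk_text_by_bytes(s, max_bytes):
--     if len(s.encode("utf-8")) <= max_bytes:
--         return [s]
--     out = []
--     cur = []
--     cur_len = 0
--     for ch in s:
--         n = len(ch.encode("utf-8"))
--         if cur and cur_len + n > max_bytes:
--             out.append("".join(cur))
--             cur = []
--             cur_len = 0
--         cur.append(ch)
--         cur_len += n
--     if cur:
--         out.append("".join(cur))
--     return out
-- ===== Notes on version B (the rewrite author's own statement) =====
-- stated objective: alternative
-- what changed: Replaces A's byte-array slicing loop (encode once, slice byte windows, back off over continuation bytes, decode each slice) by a single forward pass over the characters that accumulates a current chunk and its UTF-8 byte length, flushing when the next char would overflow; no byte slicing or backtracking.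
-- outside the precondition, e.g. on chunk_text_by_bytes('ab', 0): A does not finish within the time limit, B returns ['a', 'b']
import Mathlib
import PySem

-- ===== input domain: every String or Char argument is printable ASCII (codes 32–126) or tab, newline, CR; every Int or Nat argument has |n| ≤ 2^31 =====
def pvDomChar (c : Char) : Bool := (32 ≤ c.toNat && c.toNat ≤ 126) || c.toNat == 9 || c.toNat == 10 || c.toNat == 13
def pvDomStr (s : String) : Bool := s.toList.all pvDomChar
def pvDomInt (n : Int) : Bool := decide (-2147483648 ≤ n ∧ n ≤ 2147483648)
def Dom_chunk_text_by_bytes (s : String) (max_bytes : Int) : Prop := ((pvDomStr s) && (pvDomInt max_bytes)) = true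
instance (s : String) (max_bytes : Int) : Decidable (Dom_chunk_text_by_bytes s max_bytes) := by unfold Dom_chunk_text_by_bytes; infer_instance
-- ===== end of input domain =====

-- B replaces A's byte-slicing loop (slice byte windows, back off over continuation
-- bytes, decode each slice) by one forward pass over the characters accumulating the
-- current chunk and its byte length; same cost, no slicing or backtracking.
-- On the ASCII domain Dom the UTF-8 encoding of s is its character sequence
-- (one byte per char), so both ports represent the byte string b as s.toList —
-- exact on Dom.

-- ===== PORT A =====
-- inner 'while end > start and (b[end-1] & 0xC0) == 0x80: end -= 1'
def pvBackoff (b : List Char) (start : Int) (e : Int) : Int :=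
  if _h : start < e then
    match PySem.List.pyGet? b (e - 1) with
    | some c => if c.toNat &&& 0xC0 == 0x80 then pvBackoff b start (e - 1) else e
    | none => e
  else e
termination_by (e - start).toNat
decreasing_by omega

-- outer 'while start < L' loop; fuel = number of bytes bounds the iterations
-- whenever the Python loop terminates (each step advances start by at least 1)
def pvALoop (b : List Char) (max_bytes : Int) : Nat → Int → List String → List String
  | 0, _, out => out
  | fuel + 1, start, out =>
    if start < (b.length : Int) then
      let e := min (start + max_bytes) (b.length : Int)
      let e := pvBackoff b start e
      pvALoop b max_bytes fuel e (out ++ [String.ofList (PySem.List.slice b (some start) (some e))])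
    else out

def chunk_text_by_bytes (s : String) (max_bytes : Int) : List String :=
  let b := s.toList
  let L : Int := (b.length : Int)
  if L ≤ max_bytes then [s]
  else pvALoop b max_bytes b.length 0 []

-- ===== PORT B =====
-- len(ch.encode('utf-8'))
def pvCharBytes (c : Char) : Int :=
  if c.toNat < 0x80 then 1 else if c.toNat < 0x800 then 2
  else if c.toNat < 0x10000 then 3 else 4

def pvBStep (max_bytes : Int) (st : List Char × Int × List String) (ch : Char) :
    List Char × Int × List String :=
  let n := pvCharBytes ch
  match st with
  | (cur, curLen, out) =>
    if cur ≠ [] ∧ curLen + n > max_bytes then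
      ([ch], n, out ++ [String.ofList cur])
    else (cur ++ [ch], curLen + n, out)

def pvBFinish (st : List Char × Int × List String) : List String :=
  match st with
  | (cur, _, out) => if cur ≠ [] then out ++ [String.ofList cur] else out

def chunk_text_by_bytes_alt (s : String) (max_bytes : Int) : List String :=
  if ((s.toList.length : Int)) ≤ max_bytes then [s]
  else pvBFinish (s.toList.foldl (pvBStep max_bytes) ([], 0, []))

-- ===== PRECONDITION & SPEC =====
-- Pre_ excludes the inputs where A's outer while loop never terminates (max_bytes ≤ 0
-- with a string longer than max_bytes): there A diverges, B returns.
def Pre_chunk_text_by_bytes (s : String) (max_bytes : Int) : Prop :=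
  s.toList = [] ∨ ((s.toList.length : Int) ≤ max_bytes) ∨ 1 ≤ max_bytes
instance (s : String) (max_bytes : Int) : Decidable (Pre_chunk_text_by_bytes s max_bytes) := by
  unfold Pre_chunk_text_by_bytes; infer_instance

def pvWitness_chunk_text_by_bytes : String × Int := ("hello world", 4)

def Spec_chunk_text_by_bytes (s : String) (max_bytes : Int) (out : List String) : Prop := out = chunk_text_by_bytes_alt s max_bytes
instance (s : String) (max_bytes : Int) (out : List String) : Decidable (Spec_chunk_text_by_bytes s max_bytes out) := by unfold Spec_chunk_text_by_bytes; infer_instance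

-- ===== CLAIM (what is proved, stated in full; the proofs are below) =====
def Claim_equal_chunk_text_by_bytes : Prop := ∀ (s : String) (max_bytes : Int), Dom_chunk_text_by_bytes s max_bytes → Pre_chunk_text_by_bytes s max_bytes → Spec_chunk_text_by_bytes s max_bytes (chunk_text_by_bytes s max_bytes)

-- ===== LEMMAS AND PROOFS =====

-- reference chunking: blocks of m+1 characters
def pvChunks (m : Nat) : List Char → List String
  | [] => []
  | c :: cs => String.ofList (c :: cs.take m) :: pvChunks m (cs.drop m)
termination_by l => l.length
decreasing_by simp

theorem pvBackoff_ascii (b : List Char) (hb : ∀ c ∈ b, c.toNat < 128)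
    (start e : Int) : pvBackoff b start e = e := by
  unfold pvBackoff
  split
  · rcases hg : PySem.List.pyGet? b (e - 1) with _ | c
    · simp [hg]
    · have hc : c ∈ b := PySem.List.mem_of_pyGet?_eq_some b hg
      
      have h1 : c.toNat &&& 0xC0 ≤ c.toNat := Nat.and_le_left
      have h2 := hb c hc
      have h3 : c.toNat &&& 0xC0 ≠ 0x80 := by omega
      simp only [hg]
      rw [if_neg (by simpa using h3)]
  · rfl

theorem pvALoop_eq_chunks (b : List Char) (m : Nat)
    (hb : ∀ c ∈ b, c.toNat < 128) :
    ∀ (fuel : Nat) (start : Nat) (out : List String),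
      b.length ≤ start + fuel →
      pvALoop b ((m + 1 : Nat) : Int) fuel (start : Int) out
        = out ++ pvChunks m (b.drop start) := by
  intro fuel
  induction fuel with
  | zero =>
    intro start out h
    have hnil : b.drop start = [] := List.drop_eq_nil_of_le (by omega)
    rw [hnil, pvChunks]
    simp [pvALoop]
  | succ n ih =>
    intro start out h
    by_cases hs : start < b.length
    · have hlt : (start : Int) < (b.length : Int) := by exact_mod_cast hs
      have hmin : min ((start : Int) + ((m + 1 : Nat) : Int)) ((b.length : Int))
          = ((min (start + (m + 1)) b.length : Nat) : Int) := by
        push_cast; omega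
      unfold pvALoop
      rw [if_pos hlt]
      simp only [hmin, pvBackoff_ascii b hb]
      have hslice : PySem.List.slice b (some (start : Int))
            (some ((min (start + (m + 1)) b.length : Nat) : Int))
          = (b.drop start).take (m + 1) := by
        rw [PySem.List.slice_natCast]
        rcases Nat.le_total (start + (m + 1)) b.length with hle | hle
        · rw [Nat.min_eq_left hle]; congr 1; omega
        · rw [Nat.min_eq_right hle]
          have h1 : (b.drop start).length = b.length - start := by simp
          rw [List.take_of_length_le (by omega), List.take_of_length_le (by omega)]
      rw [hslice, ih (min (start + (m + 1)) b.length) _ (by omega)]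
      obtain ⟨c, cs, hcs⟩ : ∃ c cs, b.drop start = c :: cs := by
        cases hd : b.drop start with
        | nil => exfalso; have := List.drop_eq_nil_iff.mp hd; omega
        | cons c cs => exact ⟨c, cs, rfl⟩
      have hdrop : b.drop (min (start + (m + 1)) b.length) = cs.drop m := by
        have h1 : b.drop (min (start + (m + 1)) b.length) = b.drop (start + (m + 1)) := by
          rcases Nat.le_total (start + (m + 1)) b.length with hle | hle
          · rw [Nat.min_eq_left hle]
          · rw [Nat.min_eq_right hle, List.drop_eq_nil_of_le hle,
              List.drop_eq_nil_of_le (by omega)]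
        rw [h1]
        have := congrArg (List.drop (m + 1)) hcs
        simpa [List.drop_drop, Nat.add_comm] using this
      rw [hdrop, hcs, pvChunks]
      simp
    · have hge : ¬ ((start : Int) < (b.length : Int)) := by exact_mod_cast hs
      unfold pvALoop
      rw [if_neg hge, List.drop_eq_nil_of_le (by omega : b.length ≤ start), pvChunks]
      simp

theorem pvBFold_eq_chunks (m : Nat) :
    ∀ (l cur : List Char) (out : List String),
      (∀ c ∈ l, c.toNat < 128) →
      cur ≠ [] → cur.length ≤ m + 1 →
      pvBFinish (l.foldl (pvBStep ((m + 1 : Nat) : Int)) (cur, (cur.length : Int), out))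
        = out ++ pvChunks m (cur ++ l) := by
  intro l
  induction l with
  | nil =>
    intro cur out _ hne hlen
    obtain ⟨c, cs, rfl⟩ : ∃ c cs, cur = c :: cs := by
      cases cur with
      | nil => exact absurd rfl hne
      | cons c cs => exact ⟨c, cs, rfl⟩
    simp only [List.foldl_nil, pvBFinish, List.append_nil]
    rw [if_pos hne, pvChunks]
    have hcl : cs.length ≤ m := by simpa using hlen
    rw [List.take_of_length_le hcl, List.drop_eq_nil_of_le hcl, pvChunks]
  | cons ch rest ih =>
    intro cur out hl hne hlen
    have hch : ch.toNat < 128 := hl ch (by simp)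
    have hrest : ∀ c ∈ rest, c.toNat < 128 := fun c hc => hl c (by simp [hc])
    have hn : pvCharBytes ch = 1 := by simp [pvCharBytes, hch]
    simp only [List.foldl_cons, pvBStep, hn]
    by_cases hfull : cur.length = m + 1
    · have hcond : cur ≠ [] ∧ (cur.length : Int) + 1 > ((m + 1 : Nat) : Int) := by
        refine ⟨hne, ?_⟩; push_cast; omega
      rw [if_pos hcond]
      have hrec := ih [ch] (out ++ [String.ofList cur]) hrest (by simp) (by simp)
      simp only [List.length_cons, List.length_nil] at hrec
      push_cast at hrec ⊢
      rw [hrec]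
      obtain ⟨c, cs, rfl⟩ : ∃ c cs, cur = c :: cs := by
        cases cur with
        | nil => exact absurd rfl hne
        | cons c cs => exact ⟨c, cs, rfl⟩
      have hcsl : cs.length = m := by simpa using hfull
      subst hcsl
      have hc2 : pvChunks cs.length ((c :: cs) ++ ch :: rest)
          = String.ofList (c :: cs) :: pvChunks cs.length (ch :: rest) := by
        rw [List.cons_append, pvChunks, List.take_left, List.drop_left]
      rw [hc2]
      simp
    · have hcond : ¬ (cur ≠ [] ∧ (cur.length : Int) + 1 > ((m + 1 : Nat) : Int)) := by
        rintro ⟨-, hgt⟩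
        have : ((m + 1 : Nat) : Int) < (cur.length : Int) + 1 := hgt
        have : m + 1 < cur.length + 1 := by exact_mod_cast this
        omega
      rw [if_neg hcond]
      have hrec := ih (cur ++ [ch]) out hrest (by simp) (by simp; omega)
      simp only [List.length_append, List.length_cons, List.length_nil] at hrec
      push_cast at hrec ⊢
      rw [hrec]
      simp

-- ===== VERDICT (by name: the statement is the Claim_ definition above) =====
theorem chunk_text_by_bytes_spec : Claim_equal_chunk_text_by_bytes := by
  intro s max_bytes hdom hpre
  unfold Spec_chunk_text_by_bytes chunk_text_by_bytes chunk_text_by_bytes_alt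
  by_cases hfast : ((s.toList.length : Int)) ≤ max_bytes
  · rw [if_pos hfast, if_pos hfast]
  · rw [if_neg hfast, if_neg hfast]
    rcases hpre with hemp | hpre
    · rw [hemp]
      simp [pvALoop, pvBFinish, hemp]
    have hmb : 1 ≤ max_bytes := by
      rcases hpre with h | h
      · exact absurd h hfast
      · exact h
    obtain ⟨m, hm⟩ : ∃ m : Nat, max_bytes = ((m + 1 : Nat) : Int) := by
      refine ⟨(max_bytes - 1).toNat, ?_⟩
      push_cast; omega
    have hascii : ∀ c ∈ s.toList, c.toNat < 128 := by
      intro c hc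
      have hd : pvDomStr s = true := by
        unfold Dom_chunk_text_by_bytes at hdom
        simp only [Bool.and_eq_true] at hdom
        exact hdom.1
      have := (List.all_eq_true.mp hd) c hc
      simp only [pvDomChar, Bool.or_eq_true, Bool.and_eq_true, decide_eq_true_eq,
        beq_iff_eq] at this
      omega
    obtain ⟨c, cs, hcs⟩ : ∃ c cs, s.toList = c :: cs := by
      cases hd : s.toList with
      | nil => exfalso; rw [hd] at hfast; simp at hfast; omega
      | cons c cs => exact ⟨c, cs, rfl⟩
    subst hm
    have hA := pvALoop_eq_chunks s.toList m hascii s.toList.length 0 [] (by omega)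
    simp only [Nat.cast_zero, List.drop_zero, List.nil_append] at hA
    rw [hA, hcs]
    have hc1 : pvCharBytes c = 1 := by
      simp [pvCharBytes, hascii c (by rw [hcs]; simp)]
    simp only [List.foldl_cons, pvBStep, hc1]
    rw [if_neg (by simp)]
    have hB := pvBFold_eq_chunks m cs [c] []
      (fun x hx => hascii x (by rw [hcs]; simp [hx]))
      (by simp) (by simp)
    simp only [List.length_cons, List.length_nil, List.nil_append,
      List.singleton_append] at hB
    push_cast at hB ⊢
    simpa using hB.symm
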